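-- pv_equiv track=rewrite | github.com/swarn/roll-and-keep | roll.py | cap
-- ===== SOURCE A (Python) =====
-- def cap(r, k, add):
--     """
--     Convert excessively large numbers of thrown dice to flat bonuses.
--
--     The roll-and-keep rules suggest a maximum of 10 dice be rolled. Every two
--     rolled dice above 10 are converted to a single kept dice. Once there are
--     10 kept dice, any additional unkept or kept dice are converted into a
--     flat +2 bonus.
--     """
--     # convert rolled to kept dice at 2:1 ratio
--     while r > 11 and k < 10:
--         r -= 2
--         k += 1
--
--     # additional rolled or kept over 10 become a static +2 bonus
--     if r > 10:
--         add += 2 * (r - 10)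
--         r = 10
--     if k > 10:
--         add += 2 * (k - 10)
--         k = 10
--
--     return r, k, add
-- ===== SOURCE B (Python) =====
-- def cap(r, k, add):
--     # Branch-free closed form: conversions n, then overflow bonuses via min/max.
--     n = max(0, min((r - 10) // 2, 10 - k))
--     r2 = r - 2 * n
--     k2 = k + n
--     return (min(r2, 10), min(k2, 10),
--             add + 2 * max(0, r2 - 10) + 2 * max(0, k2 - 10))
-- ===== Notes on version B (the rewrite author's own statement) =====
-- stated objective: simpler
-- what changed: Replaces A's one-die-at-a-time conversion loop and the two conditional overflow blocks by branch-free closed-form arithmetic: a conversion count n = max(0, min((r-10)//2, 10-k)) and min/max expressions for the capped dice and the flat bonus.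
import Mathlib
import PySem

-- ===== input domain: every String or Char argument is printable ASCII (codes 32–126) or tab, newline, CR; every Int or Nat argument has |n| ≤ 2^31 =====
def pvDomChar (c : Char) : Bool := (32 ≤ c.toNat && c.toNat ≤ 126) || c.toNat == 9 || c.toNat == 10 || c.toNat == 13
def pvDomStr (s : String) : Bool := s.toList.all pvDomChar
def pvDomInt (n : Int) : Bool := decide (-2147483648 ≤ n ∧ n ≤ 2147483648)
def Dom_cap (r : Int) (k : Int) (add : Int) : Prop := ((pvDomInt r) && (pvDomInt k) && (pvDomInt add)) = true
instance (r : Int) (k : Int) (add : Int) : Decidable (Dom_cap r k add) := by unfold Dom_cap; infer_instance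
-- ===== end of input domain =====

-- B replaces A's conversion loop and its two conditional overflow blocks by branch-free
-- closed-form min/max arithmetic; objective: simpler (O(1), no loop, no branches).

-- ===== PORT A =====
-- A's while loop: while r > 11 and k < 10: r -= 2; k += 1
def capLoop (r : Int) (k : Int) : Int × Int :=
  if h : r > 11 ∧ k < 10 then capLoop (r - 2) (k + 1) else (r, k)
termination_by (10 - k).toNat
decreasing_by omega

def cap (r : Int) (k : Int) (add : Int) : Int × Int × Int :=
  let (r, k) := capLoop r k
  let (r, add) := if r > 10 then (10, add + 2 * (r - 10)) else (r, add)
  let (k, add) := if k > 10 then (10, add + 2 * (k - 10)) else (k, add)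
  (r, k, add)

-- ===== PORT B =====
def cap_alt (r : Int) (k : Int) (add : Int) : Int × Int × Int :=
  let n := max 0 (min (PySem.Int.floordiv (r - 10) 2) (10 - k))
  let r2 := r - 2 * n
  let k2 := k + n
  (min r2 10, min k2 10, add + 2 * max 0 (r2 - 10) + 2 * max 0 (k2 - 10))

-- ===== PRECONDITION & SPEC =====
def Spec_cap (r : Int) (k : Int) (add : Int) (out : Int × Int × Int) : Prop := out = cap_alt r k add
instance (r : Int) (k : Int) (add : Int) (out : Int × Int × Int) : Decidable (Spec_cap r k add out) := by unfold Spec_cap; infer_instance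

-- ===== CLAIM =====
def Claim_equal_cap : Prop := ∀ (r : Int) (k : Int) (add : Int), Dom_cap r k add → Spec_cap r k add (cap r k add)

-- ===== LEMMAS AND PROOFS =====

-- the loop computes exactly the closed-form conversion count used by B
theorem capLoop_eq (r k : Int) :
    capLoop r k = (r - 2 * max 0 (min ((r - 10) / 2) (10 - k)),
                   k + max 0 (min ((r - 10) / 2) (10 - k))) := by
  fun_induction capLoop r k with
  | case1 r k h ih =>
    rw [ih]
    have h2 : (r - 2 - 10) / 2 = (r - 10) / 2 - 1 := by omega
    simp only [h2, Prod.mk.injEq]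
    omega
  | case2 r k h =>
    have : max 0 (min ((r - 10) / 2) (10 - k)) = 0 := by omega
    simp [this]

-- ===== VERDICT =====
theorem cap_spec : Claim_equal_cap := by
  intro r k add _
  unfold Spec_cap cap cap_alt
  rw [capLoop_eq, PySem.Int.floordiv_eq_ediv_of_pos (by omega : (0:Int) < 2)]
  simp only []
  split_ifs <;> simp only [Prod.mk.injEq] <;> omega
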